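-- pv_equiv track=rewrite | github.com/pypi-data/pypi-mirror-104 | packages/steadynlp/steadynlp-0.0.1.tar.gz/steadynlp-0.0.1/src/steadynlp/textranking/_wordranking.py | build_token_pairs
-- ===== SOURCE A (Python) =====
-- def build_token_pairs(segmented_sentences: list, window_size: int) -> list:
--     """
--     Function:     To pair up the keywords; to create a
--                   network of these keywords so as to
--                   execute Google's page ranking algo
--
--     Inputs:       List of sentence keywords in a list (List)
--                   window_size; how many words at a time to
--                   look at to pair (int)
--
--     Returns:      A list of token pairs; keyword pairs
--     """
--     token_pairs = []
--     for sentence in segmented_sentences: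
--         for i, keyword in enumerate(sentence):
--             for j in range(i + 1, i + window_size):
--                 if j >= len(sentence):
--                     break
--                 pair = (keyword, sentence[j])
--                 if pair not in token_pairs:
--                     token_pairs.append(pair)
--     return token_pairs
-- ===== SOURCE B (Python) =====
-- def build_token_pairs(segmented_sentences: list, window_size: int) -> list:
--     # Pass 1: walk each sentence by suffixes (no indices): pair the head of each
--     # suffix with the next (window_size - 1) words of its tail.
--     keep = max(window_size - 1, 0)
--     all_pairs = []
--     for sentence in segmented_sentences:
--         tail = list(sentence)
--         while tail:
--             head = tail[0]
--             tail = tail[1:]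
--             for nxt in tail[:keep]:
--                 all_pairs.append((head, nxt))
--     # Pass 2: collapse to first occurrences, preserving order.
--     return list(dict.fromkeys(all_pairs))
-- ===== Notes on version B (the rewrite author's own statement) =====
-- stated objective: faster
-- what changed: B walks each sentence by suffixes (head paired with a slice of the tail, no indices or ranges) to build one flat pair list, then collapses it in a single separate final pass with dict.fromkeys, instead of A's index/enumerate/range loops with an interleaved linear membership scan on the growing result.
import Mathlib
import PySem

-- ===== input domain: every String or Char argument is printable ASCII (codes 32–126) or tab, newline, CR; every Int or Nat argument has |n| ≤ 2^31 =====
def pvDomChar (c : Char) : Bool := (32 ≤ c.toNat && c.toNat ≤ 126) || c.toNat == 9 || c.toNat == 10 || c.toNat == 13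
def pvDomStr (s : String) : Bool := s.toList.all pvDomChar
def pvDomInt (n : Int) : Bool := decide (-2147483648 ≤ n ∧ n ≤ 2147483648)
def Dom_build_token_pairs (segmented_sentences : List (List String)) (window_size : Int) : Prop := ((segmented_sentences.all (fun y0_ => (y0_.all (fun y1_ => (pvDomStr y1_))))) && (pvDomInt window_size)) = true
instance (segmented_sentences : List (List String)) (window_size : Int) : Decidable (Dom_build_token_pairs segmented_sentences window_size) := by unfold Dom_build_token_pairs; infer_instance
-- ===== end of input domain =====

-- B walks each sentence by suffixes (head paired with a slice of the tail, no indices)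
-- into one flat pair list and deduplicates once at the end (dict.fromkeys), instead of
-- A's index/range loops with an interleaved membership scan; return value proved equal.

-- ===== PORT A =====
-- inner 'for j in range(i+1, i+window_size)' loop, traversed lazily like Python's
-- range with its 'break' on j >= len(sentence)
def pvInnerA (sentence : List String) (keyword : String) (j stop : Int)
    (acc : List (String × String)) : List (String × String) :=
  if _hj : j < stop then
    if (sentence.length : Int) ≤ j then acc
    else
      let pair := (keyword, PySem.List.pyGetD sentence j "")
      pvInnerA sentence keyword (j + 1) stop (if acc.contains pair then acc else acc ++ [pair])
  else acc
termination_by (stop - j).toNat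
decreasing_by omega

def build_token_pairs (segmented_sentences : List (List String)) (window_size : Int) : List (String × String) :=
  segmented_sentences.foldl (fun token_pairs sentence =>
    (PySem.List.enumerate sentence 0).foldl (fun token_pairs ik =>
      pvInnerA sentence ik.2 (ik.1 + 1) (ik.1 + window_size) token_pairs)
      token_pairs) []

-- ===== PORT B =====
-- 'while tail: head = tail[0]; tail = tail[1:]; for nxt in tail[:keep]: append (head, nxt)'
def pvSentenceLoop (keep : Int) (tail : List String)
    (all_pairs : List (String × String)) : List (String × String) :=
  match tail with
  | [] => all_pairs
  | head :: t =>
      pvSentenceLoop keep t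
        (all_pairs ++ (PySem.List.slice t none (some keep)).map (fun nxt => (head, nxt)))

def build_token_pairs_alt (segmented_sentences : List (List String)) (window_size : Int) : List (String × String) :=
  let keep := max (window_size - 1) 0
  let all_pairs := segmented_sentences.foldl (fun acc sentence => pvSentenceLoop keep sentence acc) []
  PySem.List.dedup all_pairs

-- ===== PRECONDITION & SPEC =====
def Spec_build_token_pairs (segmented_sentences : List (List String)) (window_size : Int) (out : List (String × String)) : Prop := out = build_token_pairs_alt segmented_sentences window_size
instance (segmented_sentences : List (List String)) (window_size : Int) (out : List (String × String)) : Decidable (Spec_build_token_pairs segmented_sentences window_size out) := by unfold Spec_build_token_pairs; infer_instance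

-- ===== CLAIM (what is proved, stated in full; the proofs are below) =====
def Claim_equal_build_token_pairs : Prop := ∀ (segmented_sentences : List (List String)) (window_size : Int), Dom_build_token_pairs segmented_sentences window_size → Spec_build_token_pairs segmented_sentences window_size (build_token_pairs segmented_sentences window_size)

-- ===== LEMMAS AND PROOFS =====

-- per-sentence pair list, Nat-indexed (proof-only normal form both sides reach)
def pvH (w : Int) (s : List String) : List (String × String) :=
  (List.range s.length).flatMap (fun i =>
    ((s.drop (i + 1)).take (max (w - 1) 0).toNat).map (fun x => (s.getD i "", x)))

-- A's dedup step is exactly PySem.Set.add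
theorem pvStep_eq_add (acc : List (String × String)) (p : String × String) :
    (if acc.contains p then acc else acc ++ [p]) = PySem.Set.add acc p := rfl

-- folding a per-element inner fold = one fold over the flattened list
theorem pvFoldl_foldl {α β γ : Type} (f : β → α → β) (g : γ → List α) :
    ∀ (l : List γ) (acc : β),
      l.foldl (fun a x => (g x).foldl f a) acc = (l.flatMap g).foldl f acc := by
  intro l
  induction l with
  | nil => intro acc; rfl
  | cons x xs ih =>
    intro acc
    simp [List.flatMap_cons, List.foldl_append, ih]

-- the inner loop with its break collapses to a Set.add fold over the truncated range
theorem pvInnerA_eq (sentence : List String) (kw : String) :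
    ∀ (n : Nat) (a b : Int), (b - a).toNat = n →
      ∀ (acc : List (String × String)),
        pvInnerA sentence kw a b acc =
          ((PySem.List.pyRange a (min b (sentence.length : Int)) 1).map
              (fun j => (kw, PySem.List.pyGetD sentence j ""))).foldl PySem.Set.add acc := by
  intro n
  induction n with
  | zero =>
    intro a b h acc
    have hba : b ≤ a := by omega
    have hmin : min b (sentence.length : Int) ≤ a := le_trans (min_le_left _ _) hba
    rw [PySem.List.pyRange_one_eq_nil hmin, pvInnerA]
    simp [not_lt.mpr hba]
  | succ n ih =>
    intro a b h acc
    have hab : a < b := by omega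
    rw [pvInnerA]
    by_cases hlen : (sentence.length : Int) ≤ a
    · have hmin : min b (sentence.length : Int) ≤ a := le_trans (min_le_right _ _) hlen
      rw [PySem.List.pyRange_one_eq_nil hmin]
      simp [hab, hlen]
    · rw [not_le] at hlen
      have hmin : a < min b (sentence.length : Int) := lt_min hab hlen
      rw [PySem.List.pyRange_one_cons hmin]
      simp only [dif_pos hab, not_le.mpr hlen, List.map_cons, List.foldl_cons]
      rw [ih (a + 1) b (by omega), pvStep_eq_add]
      simp

-- an index range capped by b <= len reads exactly a drop/take segment
theorem pvMap_pyGetD_range (s : List String) :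
    ∀ (n : Nat) (a b : Int), (b - a).toNat = n → 0 ≤ a → b ≤ (s.length : Int) →
      (PySem.List.pyRange a b 1).map (fun j => PySem.List.pyGetD s j "") =
        (s.drop a.toNat).take (b - a).toNat := by
  intro n
  induction n with
  | zero =>
    intro a b h ha hb
    have hba : b ≤ a := by omega
    rw [PySem.List.pyRange_one_eq_nil hba, h]
    simp
  | succ n ih =>
    intro a b h ha hb
    have hab : a < b := by omega
    have halen : a.toNat < s.length := by omega
    rw [PySem.List.pyRange_one_cons hab, List.map_cons,
        List.drop_eq_getElem_cons halen, h, List.take_succ_cons]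
    congr 1
    · exact PySem.List.pyGetD_eq_getElem s "" ha (by omega)
    · have e1 : (a + 1).toNat = a.toNat + 1 := by omega
      have e2 : (b - (a + 1)).toNat = n := by omega
      rw [ih (a + 1) b (by omega) (by omega) hb, e1, e2]

-- the capped take count equals keep = max(w-1,0) (take clamps at the list's length)
theorem pvTake_min_eq (s : List String) (i w : Int) (hi : 0 ≤ i) :
    (s.drop (i + 1).toNat).take (min (i + w) (s.length : Int) - (i + 1)).toNat =
      (s.drop (i + 1).toNat).take (max (w - 1) 0).toNat := by
  rw [List.take_eq_take_iff]
  simp only [List.length_drop]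
  omega

-- A's per-sentence loop is a Set.add fold over pvH
theorem pvPerSentenceA (w : Int) (s : List String) (acc : List (String × String)) :
    (PySem.List.enumerate s 0).foldl (fun acc ik =>
        pvInnerA s ik.2 (ik.1 + 1) (ik.1 + w) acc) acc =
      (pvH w s).foldl PySem.Set.add acc := by
  rw [PySem.List.enumerate_eq_map_pyRange s "", List.foldl_map]
  rw [PySem.List.foldl_congr_mem' _ _
      (fun acc2 i => (((s.drop (i + 1).toNat).take (max (w - 1) 0).toNat).map
        (fun x => (PySem.List.pyGetD s i "", x))).foldl PySem.Set.add acc2) _ ?_]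
  · rw [pvFoldl_foldl]
    unfold pvH
    rw [PySem.List.pyRange_one]
    simp only [Int.sub_zero, Int.toNat_natCast, List.flatMap_map, PySem.List.len_eq]
    refine congrArg (List.foldl PySem.Set.add acc) (List.flatMap_congr (fun k _ => ?_))
    simp
  · intro i hi acc2
    have h0i : 0 ≤ i := ((PySem.List.mem_pyRange_one).1 hi).1
    rw [pvInnerA_eq s _ _ (i + 1) (i + w) rfl]
    have hmap : (PySem.List.pyRange (i + 1) (min (i + w) (s.length : Int)) 1).map
        (fun j => (PySem.List.pyGetD s i "", PySem.List.pyGetD s j "")) =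
        ((s.drop (i + 1).toNat).take (max (w - 1) 0).toNat).map
          (fun x => (PySem.List.pyGetD s i "", x)) := by
      have hcomp : (fun j => (PySem.List.pyGetD s i "", PySem.List.pyGetD s j "")) =
          (fun x => (PySem.List.pyGetD s i "", x)) ∘ (fun j => PySem.List.pyGetD s j "") := rfl
      rw [hcomp, ← List.map_map,
          pvMap_pyGetD_range s _ (i + 1) (min (i + w) (s.length : Int)) rfl (by omega)
            (min_le_right _ _),
          pvTake_min_eq s i w h0i]
    rw [hmap]

-- pvH on a cons: head pairs then the tail's pairs
theorem pvH_cons (w : Int) (h : String) (t : List String) :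
    pvH w (h :: t) = (t.take (max (w - 1) 0).toNat).map (fun x => (h, x)) ++ pvH w t := by
  unfold pvH
  rw [List.length_cons, List.range_succ_eq_map, List.flatMap_cons, List.flatMap_map]
  congr 1

-- B's per-sentence loop appends pvH
theorem pvSentenceLoop_eq (w : Int) (s : List String) :
    ∀ (acc : List (String × String)),
      pvSentenceLoop (max (w - 1) 0) s acc = acc ++ pvH w s := by
  induction s with
  | nil => intro acc; simp [pvSentenceLoop, pvH]
  | cons h t ih =>
    intro acc
    rw [pvSentenceLoop, ih, pvH_cons,
        PySem.List.slice_to _ (le_max_right _ _), List.append_assoc]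

-- ===== VERDICT (by name: the statement is the Claim_ definition above) =====
theorem build_token_pairs_spec : Claim_equal_build_token_pairs := by
  intro ss w _
  unfold Spec_build_token_pairs build_token_pairs build_token_pairs_alt
  simp only []
  rw [PySem.List.foldl_congr_mem' _ _
        (fun tp s => (pvH w s).foldl PySem.Set.add tp) _
        (fun s _ acc => pvPerSentenceA w s acc),
      pvFoldl_foldl,
      PySem.List.foldl_congr_mem' _ _
        (fun acc s => acc ++ pvH w s) _
        (fun s _ acc => pvSentenceLoop_eq w s acc),
      PySem.List.foldl_append_eq_flatMap,
      PySem.List.dedup_eq_ofList, PySem.Set.ofList_eq_foldl, List.nil_append]
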